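-- pv_equiv track=rewrite | github.com/Radcliffe/OEIS-Python | src/oeispy/A292/A292673.py | A292673
-- ===== SOURCE A (Python) =====
-- def A292673(n, b=3): # change b for A292672, ..., A292679
--     m, S, N = 0, {1}, range(1, n+1)
--     g = [[0 for j in range(n+b)] for i in range(n+b)]
--     row, col = {i:set() for i in N}, {j:set() for j in N}
--     offsets = [(i, j) for i in range(-b+1, 1) for j in range(-b+1, 1)]
--     offsets += [(i, j) for i in range(-b+1, 0) for j in range(1, b)]
--     for i in N:
--         for j in N:
--             rect = set(g[i+o[0]][j+o[1]] for o in offsets)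
--             e = min(S - row[i] - col[j] - rect)
--             g[i][j] = e
--             if e > m:
--                 m = e
--                 S.add(m+1)
--             row[i].add(e)
--             col[j].add(e)
--     return m
-- ===== SOURCE B (Python) =====
-- def A292673(n, b=3):
--     # same greedy mex-fill, but without A's maintained S / row / col set structures:
--     # forbidden values are re-read from the grid into a plain list and the mex found
--     # with a presence table (the mex is at most len(used)+1).
--     m = 0
--     g = [[0] * (n + b) for i in range(n + b)]
--     offsets = [(oi, oj) for oi in range(-b + 1, 1) for oj in range(-b + 1, 1)]
--     offsets += [(oi, oj) for oi in range(-b + 1, 0) for oj in range(1, b)]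
--     for i in range(1, n + 1):
--         for j in range(1, n + 1):
--             used = [g[i][k] for k in range(1, j)] + [g[k][j] for k in range(1, i)] \
--                 + [g[i + oi][j + oj] for oi, oj in offsets]
--             L = len(used)
--             present = [False] * (L + 2)
--             for v in used:
--                 if 1 <= v <= L + 1:
--                     present[v] = True
--             e = 1
--             while present[e]:
--                 e += 1
--             g[i][j] = e
--             if e > m:
--                 m = e
--     return m
-- ===== Notes on version B (the rewrite author's own statement) =====
-- stated objective: alternative
-- what changed: B drops A's maintained S / row[i] / col[j] sets entirely: for each cell it re-reads the forbidden row, column and rectangle values from the grid into a plain list and finds the mex with a counting-style presence table, instead of maintaining per-row/per-column sets and taking the min of set differences against S={1..m+1}.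
import Mathlib
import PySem

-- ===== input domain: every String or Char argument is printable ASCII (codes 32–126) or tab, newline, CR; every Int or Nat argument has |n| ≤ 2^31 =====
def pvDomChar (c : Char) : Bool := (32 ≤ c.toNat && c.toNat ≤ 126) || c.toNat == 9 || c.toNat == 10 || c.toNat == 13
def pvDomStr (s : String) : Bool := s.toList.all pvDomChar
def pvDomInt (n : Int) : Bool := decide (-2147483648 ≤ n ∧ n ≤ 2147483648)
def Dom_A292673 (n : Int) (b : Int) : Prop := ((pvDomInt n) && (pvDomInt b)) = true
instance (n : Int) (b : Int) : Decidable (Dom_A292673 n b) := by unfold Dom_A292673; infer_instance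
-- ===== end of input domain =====

-- B replaces A's maintained S / row / col sets by re-reading the forbidden values from the
-- grid and finding the mex by counting upwards (objective: alternative decomposition).

-- ===== PORT A =====
-- shared index helpers (both Pythons use the same g[r][c] expressions):
-- g[r][c] (Python list indexing; a negative index wraps); the defaults are unreachable under Pre_
def pvGread (g : List (List Int)) (r c : Int) : Int :=
  PySem.List.pyGetD (PySem.List.pyGetD g r []) c 0

-- g[i][j] = e ; the .getD fallbacks are unreachable under Pre_ (indices in range)
def pvGwrite (g : List (List Int)) (i j : Int) (e : Int) : List (List Int) :=
  (PySem.List.pySet? g i ((PySem.List.pySet? (PySem.List.pyGetD g i []) j e).getD [])).getD g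

-- offsets = [...] + [...] (the same two comprehensions appear in both Pythons)
def pvOffsets (b : Int) : List (Int × Int) :=
  (PySem.List.pyRange (-b+1) 1).flatMap (fun oi => (PySem.List.pyRange (-b+1) 1).map (fun oj => (oi, oj)))
  ++ (PySem.List.pyRange (-b+1) 0).flatMap (fun oi => (PySem.List.pyRange 1 b).map (fun oj => (oi, oj)))

abbrev pvStA := Int × PySem.Set Int × List (List Int) ×
  PySem.Dict Int (PySem.Set Int) × PySem.Dict Int (PySem.Set Int)

-- the body of A's inner loop (state m, S, g, row, col)
def pvStepA (b i j : Int) (st : pvStA) : pvStA :=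
  let m := st.1; let S := st.2.1; let g := st.2.2.1; let row := st.2.2.2.1; let col := st.2.2.2.2
  let rect : PySem.Set Int :=
    PySem.Set.ofList ((pvOffsets b).map (fun o => pvGread g (i + o.1) (j + o.2)))
  -- e = min(S - row[i] - col[j] - rect); the .getD 0 is unreachable under Pre_ (m+1 is always available)
  let e := (PySem.List.min?
      (PySem.Set.diff (PySem.Set.diff (PySem.Set.diff S (row.getD i PySem.Set.empty))
        (col.getD j PySem.Set.empty)) rect) (fun x => x)).getD 0
  let g' := pvGwrite g i j e
  let p := if e > m then (e, PySem.Set.add S (e+1)) else (m, S)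
  (p.1, p.2, g', row.modify i PySem.Set.empty (fun s => PySem.Set.add s e),
   col.modify j PySem.Set.empty (fun s => PySem.Set.add s e))

def A292673 (n : Int) (b : Int) : Int :=
  let N := PySem.List.pyRange 1 (n+1)
  let g : List (List Int) :=
    (PySem.List.pyRange 0 (n+b)).map (fun _ => (PySem.List.pyRange 0 (n+b)).map (fun _ => (0:Int)))
  let row : PySem.Dict Int (PySem.Set Int) :=
    N.foldl (fun d i => d.insert i PySem.Set.empty) PySem.Dict.empty
  let col : PySem.Dict Int (PySem.Set Int) :=
    N.foldl (fun d j => d.insert j PySem.Set.empty) PySem.Dict.empty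
  let res := N.foldl (fun st i => N.foldl (fun st j => pvStepA b i j st) st)
    ((0 : Int), PySem.Set.ofList [(1 : Int)], g, row, col)
  res.1

-- ===== PORT B =====
abbrev pvStB := Int × List (List Int)

-- if 1 <= v <= L + 1: present[v] = True  (the guard keeps the index in bounds)
def pvMark (L1 : Int) (a : Array Bool) (v : Int) : Array Bool :=
  if 1 ≤ v ∧ v ≤ L1 then a.setIfInBounds v.toNat true else a

-- while present[e]: e += 1  (fuel used.length+1 always suffices and the loop provably
-- stops before any out-of-range read: the window 1..L+1 cannot be covered by used,
-- see pvScan_spec / pvExists_not_mem below)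
def pvScan (present : Array Bool) (e : Int) : Nat → Int
  | 0 => e
  | fuel+1 => if present.getD e.toNat false then pvScan present (e+1) fuel else e

-- the body of B's inner loop (state m, g)
def pvStepB (b i j : Int) (st : pvStB) : pvStB :=
  let m := st.1; let g := st.2
  let used := ((PySem.List.pyRange 1 j).map (fun k => pvGread g i k) ++
    (PySem.List.pyRange 1 i).map (fun k => pvGread g k j)) ++
    (pvOffsets b).map (fun o => pvGread g (i + o.1) (j + o.2))
  let L : Int := used.length
  let present := used.foldl (pvMark (L+1)) (Array.replicate (L+2).toNat false)
  let e := pvScan present 1 (used.length + 1)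
  let g' := pvGwrite g i j e
  ((if e > m then e else m), g')

def A292673_alt (n : Int) (b : Int) : Int :=
  let g : List (List Int) :=
    (PySem.List.pyRange 0 (n+b)).map (fun _ => List.replicate (n+b).toNat (0:Int))
  let res := (PySem.List.pyRange 1 (n+1)).foldl
    (fun st i => (PySem.List.pyRange 1 (n+1)).foldl (fun st j => pvStepB b i j st) st)
    ((0 : Int), g)
  res.1

-- ===== PRECONDITION & SPEC =====
-- Pre_ excludes exactly the inputs on which A raises (n ≥ 1 with b ≤ 0: the grid has fewer
-- than n+1 rows/columns, so an IndexError is raised); A returns on every other input.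
def Pre_A292673 (n : Int) (b : Int) : Prop := n ≤ 0 ∨ 1 ≤ b
instance (n : Int) (b : Int) : Decidable (Pre_A292673 n b) := by unfold Pre_A292673; infer_instance

def pvWitness_A292673 : Int × Int := (4, 3)

def Spec_A292673 (n : Int) (b : Int) (out : Int) : Prop := out = A292673_alt n b
instance (n : Int) (b : Int) (out : Int) : Decidable (Spec_A292673 n b out) := by
  unfold Spec_A292673; infer_instance

-- ===== CLAIM (what is proved, stated in full; the proofs are below) =====
def Claim_equal_A292673 : Prop :=
  ∀ (n : Int) (b : Int), Dom_A292673 n b → Pre_A292673 n b → Spec_A292673 n b (A292673 n b)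

-- ===== LEMMAS AND PROOFS =====

-- cells already filled when the loop is about to process cell (i, j)
def pvProc (i j r c : Int) : Prop := r < i ∨ (r = i ∧ c < j)

-- invariant of A's loop state when about to process cell (i, j)
def pvInv (n b i j : Int) (st : pvStA) : Prop :=
  (∀ v : Int, v ∈ st.2.1 ↔ 1 ≤ v ∧ v ≤ st.1 + 1) ∧
  0 ≤ st.1 ∧
  st.2.2.1.length = (n+b).toNat ∧
  (∀ r ∈ st.2.2.1, r.length = (n+b).toNat) ∧
  (∀ r ∈ st.2.2.1, ∀ v ∈ r, 0 ≤ v ∧ v ≤ st.1) ∧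
  (∀ i' : Int, 1 ≤ i' → i' ≤ n → ∀ v,
    (v ∈ st.2.2.2.1.getD i' PySem.Set.empty) ↔
      ∃ k, 1 ≤ k ∧ k ≤ n ∧ pvProc i j i' k ∧ v = pvGread st.2.2.1 i' k) ∧
  (∀ j' : Int, 1 ≤ j' → j' ≤ n → ∀ v,
    (v ∈ st.2.2.2.2.getD j' PySem.Set.empty) ↔
      ∃ k, 1 ≤ k ∧ k ≤ n ∧ pvProc i j k j' ∧ v = pvGread st.2.2.1 k j')

-- the simulation relation between the two loop states
def pvRel (n b i j : Int) (sa : pvStA) (sb : pvStB) : Prop :=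
  sa.1 = sb.1 ∧ sa.2.2.1 = sb.2 ∧ pvInv n b i j sa

lemma pvPyGetD_mem_or {α : Type} (xs : List α) (i : Int) (d : α) :
    PySem.List.pyGetD xs i d = d ∨ PySem.List.pyGetD xs i d ∈ xs := by
  unfold PySem.List.pyGetD
  cases h : PySem.List.pyGet? xs i with
  | none => left; rfl
  | some x => right; simpa using PySem.List.mem_of_pyGet?_eq_some xs h

lemma pvGread_bound {g : List (List Int)} {m : Int} (hm : 0 ≤ m)
    (hb : ∀ r ∈ g, ∀ v ∈ r, 0 ≤ v ∧ v ≤ m) (r c : Int) :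
    0 ≤ pvGread g r c ∧ pvGread g r c ≤ m := by
  unfold pvGread
  rcases pvPyGetD_mem_or g r [] with h | h
  · rw [h]; rcases pvPyGetD_mem_or ([] : List Int) c 0 with h2 | h2
    · rw [h2]; omega
    · simp at h2
  · rcases pvPyGetD_mem_or (PySem.List.pyGetD g r []) c 0 with h2 | h2
    · rw [h2]; omega
    · exact hb _ h _ h2

lemma pvGread_nonneg (g : List (List Int)) (r c : Int) (hr : 0 ≤ r) (hc : 0 ≤ c) :
    pvGread g r c = (g.getD r.toNat []).getD c.toNat 0 := by
  unfold pvGread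
  rw [PySem.List.pyGetD_of_nonneg _ _ hr, PySem.List.pyGetD_of_nonneg _ _ hc]

lemma pvGwrite_eq {g : List (List Int)} {i j e : Int} (hi : 0 ≤ i)
    (hiL : i.toNat < g.length) (hj : 0 ≤ j) (hjL : j.toNat < (g.getD i.toNat []).length) :
    pvGwrite g i j e = g.set i.toNat ((g.getD i.toNat []).set j.toNat e) := by
  unfold pvGwrite PySem.List.pySet? PySem.List.pyIdx?
  rw [PySem.List.pyGetD_of_nonneg _ _ hi]
  rw [if_pos hj, if_pos (show j < ((g.getD i.toNat []).length : Int) by omega),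
      if_pos hi, if_pos (show i < (g.length : Int) by omega)]
  simp

lemma pvGwrite_length {g : List (List Int)} {i j e : Int} (hi : 0 ≤ i)
    (hiL : i.toNat < g.length) (hj : 0 ≤ j) (hjL : j.toNat < (g.getD i.toNat []).length) :
    (pvGwrite g i j e).length = g.length := by
  rw [pvGwrite_eq hi hiL hj hjL]; simp

lemma pvGwrite_rows {g : List (List Int)} {i j e : Int} (hi : 0 ≤ i)
    (hiL : i.toNat < g.length) (hj : 0 ≤ j) (hjL : j.toNat < (g.getD i.toNat []).length)
    {r : List Int} (hr : r ∈ pvGwrite g i j e) :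
    (r ∈ g ∧ r.length = r.length) ∨ r = (g.getD i.toNat []).set j.toNat e := by
  rw [pvGwrite_eq hi hiL hj hjL] at hr
  rcases List.mem_or_eq_of_mem_set hr with h | h
  · left; exact ⟨h, rfl⟩
  · right; exact h

lemma pvGread_write_self {g : List (List Int)} {i j e : Int} (hi : 0 ≤ i)
    (hiL : i.toNat < g.length) (hj : 0 ≤ j) (hjL : j.toNat < (g.getD i.toNat []).length) :
    pvGread (pvGwrite g i j e) i j = e := by
  rw [pvGwrite_eq hi hiL hj hjL, pvGread_nonneg _ _ _ hi hj]
  have hgi : g.getD i.toNat [] = g[i.toNat] := by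
    rw [List.getD_eq_getElem?_getD, List.getElem?_eq_getElem hiL]; rfl
  simp [List.getD_eq_getElem?_getD, hiL, hgi ▸ hjL]

lemma pvGread_write_ne {g : List (List Int)} {i j e : Int} (hi : 0 ≤ i)
    (hiL : i.toNat < g.length) (hj : 0 ≤ j) (hjL : j.toNat < (g.getD i.toNat []).length)
    {r c : Int} (hr : 0 ≤ r) (hc : 0 ≤ c) (hne : ¬ (r = i ∧ c = j)) :
    pvGread (pvGwrite g i j e) r c = pvGread g r c := by
  rw [pvGwrite_eq hi hiL hj hjL, pvGread_nonneg _ _ _ hr hc, pvGread_nonneg _ _ _ hr hc]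
  by_cases hri : r = i
  · subst hri
    have hcj : c ≠ j := fun h => hne ⟨rfl, h⟩
    simp [List.getD_eq_getElem?_getD, hiL,
      (show ¬ (j.toNat = c.toNat) by omega)]
  · simp [List.getD_eq_getElem?_getD,
      (show ¬ (i.toNat = r.toNat) by omega)]

-- the dict {i: set() for i in N} answers set() (= []) at every key
lemma pvDictInit_getD (l : List Int) (d : PySem.Dict Int (PySem.Set Int))
    (h : ∀ x, d.getD x PySem.Set.empty = PySem.Set.empty) (x : Int) :
    (l.foldl (fun d i => d.insert i PySem.Set.empty) d).getD x PySem.Set.empty =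
      PySem.Set.empty := by
  induction l generalizing d with
  | nil => exact h x
  | cons a t ih =>
    simp only [List.foldl_cons]
    exact ih _ (fun y => by rw [PySem.Dict.getD_insert]; split <;> [rfl; exact h y])

-- pigeonhole: a duplicate-free list misses some value in any window one longer than it
lemma pvExists_not_mem (l : List Int) (e : Int) :
    ∃ t, e ≤ t ∧ t < e + (l.length + 1) ∧ t ∉ l := by
  by_contra hcon
  have hcon' : ∀ t, e ≤ t → t < e + (l.length + 1) → t ∈ l := by
    intro t h1 h2
    by_contra hmem
    exact hcon ⟨t, h1, h2, hmem⟩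
  have hsub : PySem.List.pyRange e (e + (l.length + 1)) ⊆ l := by
    intro x hx
    rw [PySem.List.mem_pyRange_one] at hx
    exact hcon' x hx.1 hx.2
  have hlen : (PySem.List.pyRange e (e + (l.length + 1))).length ≤ l.length := by
    calc (PySem.List.pyRange e (e + (l.length + 1))).length
        = (PySem.List.pyRange e (e + (l.length + 1))).toFinset.card :=
          (List.toFinset_card_of_nodup (PySem.List.nodup_pyRange_one _ _)).symm
      _ ≤ l.toFinset.card := Finset.card_le_card (by
          intro x hx; rw [List.mem_toFinset] at hx ⊢; exact hsub hx)
      _ ≤ l.length := List.toFinset_card_le l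
  rw [PySem.List.length_pyRange_one] at hlen
  omega

-- the marking loop does not change the table's size
lemma pvMark_size (L1 : Int) (l : List Int) (a : Array Bool) :
    (l.foldl (pvMark L1) a).size = a.size := by
  induction l generalizing a with
  | nil => rfl
  | cons x t ih =>
    simp only [List.foldl_cons]
    rw [ih]
    unfold pvMark
    split
    · simp
    · rfl

-- after the marking loop, a window slot is set exactly for the members of the list
lemma pvMark_get (L1 : Int) (l : List Int) (a : Array Bool) (t : Int)
    (ht1 : 1 ≤ t) (ht2 : t ≤ L1) (hsz : t.toNat < a.size) :
    ((l.foldl (pvMark L1) a).getD t.toNat false = true) ↔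
      (a.getD t.toNat false = true ∨ t ∈ l) := by
  induction l generalizing a with
  | nil => simp
  | cons x s ih =>
    simp only [List.foldl_cons]
    have hsz' : t.toNat < (pvMark L1 a x).size := by
      unfold pvMark
      split
      · simpa using hsz
      · exact hsz
    rw [ih _ hsz', List.mem_cons]
    unfold pvMark
    by_cases hg : 1 ≤ x ∧ x ≤ L1
    · rw [if_pos hg]
      by_cases hxt : x = t
      · subst hxt
        have : (a.setIfInBounds x.toNat true).getD x.toNat false = true := by
          simp [Array.getD, Array.setIfInBounds, hsz]
        rw [this]
        simp
      · have hne : ¬ (x.toNat = t.toNat) := by omega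
        have : (a.setIfInBounds x.toNat true).getD t.toNat false = a.getD t.toNat false := by
          by_cases hx : x.toNat < a.size
          · simp [Array.getD, Array.setIfInBounds, hx, hsz, hne]
          · simp [Array.setIfInBounds, hx]
        rw [this]
        constructor
        · rintro (h | h)
          · exact Or.inl h
          · exact Or.inr (Or.inr h)
        · rintro (h | h | h)
          · exact Or.inl h
          · exact absurd h.symm hxt
          · exact Or.inr h
    · rw [if_neg hg]
      have hxt : ¬ (t = x) := fun h => hg (h ▸ ⟨ht1, ht2⟩)
      constructor
      · rintro (h | h)
        · exact Or.inl h
        · exact Or.inr (Or.inr h)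
      · rintro (h | h | h)
        · exact Or.inl h
        · exact absurd h hxt
        · exact Or.inr h

-- what the while-loop computes: the least position ≥ e whose slot is clear, given enough fuel
lemma pvScan_spec (p : Array Bool) :
    ∀ (fuel : Nat) (e : Int), (∃ t, e ≤ t ∧ t < e + fuel ∧ p.getD t.toNat false = false) →
      e ≤ pvScan p e fuel ∧ p.getD (pvScan p e fuel).toNat false = false ∧
      (∀ x, e ≤ x → x < pvScan p e fuel → p.getD x.toNat false = true) := by
  intro fuel
  induction fuel with
  | zero => intro e ⟨t, h1, h2, _⟩; omega
  | succ f ih =>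
    intro e ⟨t, h1, h2, h3⟩
    unfold pvScan
    by_cases he : p.getD e.toNat false = true
    · rw [if_pos he]
      have ht : e + 1 ≤ t := by
        rcases eq_or_lt_of_le h1 with rfl | h
        · rw [he] at h3; exact absurd h3 (by decide)
        · omega
      obtain ⟨ha, hb, hc⟩ := ih (e+1) ⟨t, ht, by omega, h3⟩
      refine ⟨by omega, hb, fun x hx1 hx2 => ?_⟩
      rcases eq_or_lt_of_le hx1 with rfl | h
      · exact he
      · exact hc x (by omega) hx2
    · rw [if_neg (by simpa using he)]
      exact ⟨le_refl _, by simpa using he, fun x h1 h2 => by omega⟩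

-- the heart: one cell step preserves the relation
set_option maxHeartbeats 1600000 in
lemma pvStep_rel {n b i j : Int} (hb : 1 ≤ b) (hn : 1 ≤ n)
    (hi1 : 1 ≤ i) (hin : i ≤ n) (hj1 : 1 ≤ j) (hjn : j ≤ n)
    {m : Int} {S : PySem.Set Int} {g : List (List Int)}
    {row col : PySem.Dict Int (PySem.Set Int)}
    (hInv : pvInv n b i j (m, S, g, row, col)) :
    pvRel n b i (j+1) (pvStepA b i j (m, S, g, row, col)) (pvStepB b i j (m, g)) := by
  obtain ⟨hS, hm0, hlen, hrows, hbnd, hrow, hcol⟩ := hInv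
  dsimp only at hS hm0 hlen hrows hbnd hrow hcol
  have hi0 : (0:Int) ≤ i := by omega
  have hj0 : (0:Int) ≤ j := by omega
  have hiL : i.toNat < g.length := by rw [hlen]; omega
  have hrowg : g.getD i.toNat [] ∈ g := by
    rw [List.getD_eq_getElem?_getD, List.getElem?_eq_getElem hiL]
    exact List.getElem_mem hiL
  have hjL : j.toNat < (g.getD i.toNat []).length := by rw [hrows _ hrowg]; omega
  simp only [pvStepA, pvStepB]
  set rectL : List Int := (pvOffsets b).map (fun o => pvGread g (i + o.1) (j + o.2)) with hrectL
  set rowL : List Int := (PySem.List.pyRange 1 j).map (fun k => pvGread g i k) with hrowL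
  set colL : List Int := (PySem.List.pyRange 1 i).map (fun k => pvGread g k j) with hcolL
  set used : List Int := (rowL ++ colL) ++ rectL with husedDef
  set fb : PySem.Set Int := PySem.Set.diff (PySem.Set.diff
    (PySem.Set.diff S (row.getD i PySem.Set.empty)) (col.getD j PySem.Set.empty))
    (PySem.Set.ofList rectL) with hfbDef
  have hmemUsed : ∀ v, v ∈ used ↔ v ∈ rowL ∨ v ∈ colL ∨ v ∈ rectL := by
    intro v
    rw [husedDef, List.mem_append, List.mem_append]
    exact or_assoc
  have husedBnd : ∀ v ∈ used, 0 ≤ v ∧ v ≤ m := by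
    intro v hv
    rw [hmemUsed v] at hv
    rcases hv with h | h | h
    · rw [hrowL] at h
      simp only [List.mem_map] at h
      obtain ⟨k, hk, rfl⟩ := h
      exact pvGread_bound hm0 hbnd _ _
    · rw [hcolL] at h
      simp only [List.mem_map] at h
      obtain ⟨k, hk, rfl⟩ := h
      exact pvGread_bound hm0 hbnd _ _
    · rw [hrectL] at h
      simp only [List.mem_map] at h
      obtain ⟨o, ho, rfl⟩ := h
      exact pvGread_bound hm0 hbnd _ _
  have husedrow : ∀ v, (v ∈ row.getD i PySem.Set.empty) ↔ v ∈ rowL := by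
    intro v
    rw [hrow i hi1 hin v, hrowL]
    simp only [List.mem_map, PySem.List.mem_pyRange_one]
    constructor
    · rintro ⟨k, h1, h2, h3, rfl⟩
      exact ⟨k, ⟨h1, by unfold pvProc at h3; omega⟩, rfl⟩
    · rintro ⟨k, ⟨h1, h2⟩, rfl⟩
      exact ⟨k, h1, by omega, by unfold pvProc; omega, rfl⟩
  have husedcol : ∀ v, (v ∈ col.getD j PySem.Set.empty) ↔ v ∈ colL := by
    intro v
    rw [hcol j hj1 hjn v, hcolL]
    simp only [List.mem_map, PySem.List.mem_pyRange_one]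
    constructor
    · rintro ⟨k, h1, h2, h3, rfl⟩
      exact ⟨k, ⟨h1, by unfold pvProc at h3; omega⟩, rfl⟩
    · rintro ⟨k, ⟨h1, h2⟩, rfl⟩
      exact ⟨k, h1, by omega, by unfold pvProc; omega, rfl⟩
  have hmemF : ∀ v, v ∈ fb ↔ ((1 ≤ v ∧ v ≤ m + 1) ∧ v ∉ used) := by
    intro v
    rw [hfbDef, PySem.Set.mem_diff, PySem.Set.mem_diff, PySem.Set.mem_diff, hS v,
      husedrow v, husedcol v, PySem.Set.mem_ofList, hmemUsed v]
    constructor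
    · rintro ⟨⟨⟨hv, h1⟩, h2⟩, h3⟩
      exact ⟨hv, fun h => by rcases h with h | h | h; exacts [h1 h, h2 h, h3 h]⟩
    · rintro ⟨hv, h⟩
      exact ⟨⟨⟨hv, fun hh => h (Or.inl hh)⟩, fun hh => h (Or.inr (Or.inl hh))⟩,
        fun hh => h (Or.inr (Or.inr hh))⟩
  have hm1F : (m+1) ∈ fb := by
    rw [hmemF]
    exact ⟨⟨by omega, le_refl _⟩, fun h => by have := husedBnd _ h; omega⟩
  obtain ⟨eA, hminEq⟩ : ∃ x, PySem.List.min? fb (fun x => x) = some x := by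
    cases h : PySem.List.min? fb (fun x => x) with
    | none =>
      rw [PySem.List.min?_eq_none_iff] at h
      rw [h] at hm1F
      exact absurd hm1F (List.not_mem_nil)
    | some x => exact ⟨x, rfl⟩
  rw [hminEq]
  simp only [Option.getD_some]
  have heAmem : eA ∈ fb := PySem.List.min?_mem hminEq
  have heAmin : ∀ y ∈ fb, eA ≤ y := PySem.List.min?_isMin hminEq
  have heAprops := (hmemF eA).mp heAmem
  -- B's side
  set present : Array Bool := used.foldl (pvMark ((used.length : Int) + 1))
    (Array.replicate ((used.length : Int) + 2).toNat false) with hpresentDef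
  have hpsz : present.size = ((used.length : Int) + 2).toNat := by
    rw [hpresentDef, pvMark_size, Array.size_replicate]
  have hgetIff : ∀ u : Int, 1 ≤ u → u ≤ (used.length : Int) + 1 →
      ((present.getD u.toNat false = true) ↔ u ∈ used) := by
    intro u h1 h2
    rw [hpresentDef, pvMark_get _ _ _ u h1 h2 (by rw [Array.size_replicate]; omega)]
    simp [Array.getD]
  obtain ⟨t, ht1, ht2, ht3⟩ := pvExists_not_mem used 1
  have htwin : t ≤ (used.length : Int) + 1 := by omega
  have htp : present.getD t.toNat false = false := by
    rcases Bool.eq_false_or_eq_true (present.getD t.toNat false) with h | h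
    · exact absurd ((hgetIff t ht1 htwin).mp h) ht3
    · exact h
  obtain ⟨hB1, hB2p, hB3p⟩ := pvScan_spec present (used.length + 1) 1 ⟨t, ht1, by omega, htp⟩
  set eB := pvScan present 1 (used.length + 1) with heBdef
  have hBt : eB ≤ t := by
    by_contra hcon
    have := hB3p t ht1 (by omega)
    rw [htp] at this
    exact absurd this (by decide)
  have hB2 : eB ∉ used := by
    intro hmem
    have := (hgetIff eB hB1 (by omega)).mpr hmem
    rw [hB2p] at this
    exact absurd this (by decide)
  have hB3 : ∀ x, 1 ≤ x → x < eB → x ∈ used := fun x h1 h2 =>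
    (hgetIff x h1 (by omega)).mp (hB3p x h1 h2)
  have hBle : eB ≤ m + 1 := by
    by_contra hcon
    have hmem : (m+1) ∈ used := hB3 (m+1) (by omega) (by omega)
    have := husedBnd _ hmem
    omega
  have hABle : eA ≤ eB := heAmin eB ((hmemF eB).mpr ⟨⟨hB1, hBle⟩, hB2⟩)
  have hBA : eB ≤ eA := by
    by_contra hcon
    exact heAprops.2 (hB3 eA heAprops.1.1 (by omega))
  have he : eA = eB := le_antisymm hABle hBA
  subst he
  have hm1 : ((if eB > m then (eB, PySem.Set.add S (eB+1)) else (m, S)).1 : Int) =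
      if eB > m then eB else m := by split <;> rfl
  have hS1 : ((if eB > m then (eB, PySem.Set.add S (eB+1)) else (m, S)).2 : PySem.Set Int) =
      if eB > m then PySem.Set.add S (eB+1) else S := by split <;> rfl
  refine ⟨hm1, rfl, ?_⟩
  unfold pvInv
  dsimp only
  rw [hm1, hS1]
  set M : Int := if eB > m then eB else m with hMdef
  have heB1 : 1 ≤ eB := heAprops.1.1
  have heBle : eB ≤ m + 1 := heAprops.1.2
  have hMge : m ≤ M ∧ eB ≤ M ∧ 0 ≤ M := by rw [hMdef]; split <;> omega
  have hS1mem : ∀ v : Int, (v ∈ (if eB > m then PySem.Set.add S (eB+1) else S)) ↔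
      1 ≤ v ∧ v ≤ M + 1 := by
    intro v
    rw [hMdef]
    by_cases hc : eB > m
    · simp only [if_pos hc, PySem.Set.mem_add, hS v]
      omega
    · simp only [if_neg hc, hS v]
  set g1 := pvGwrite g i j eB with hg1def
  have hglen : g1.length = (n+b).toNat := by
    rw [hg1def, pvGwrite_length hi0 hiL hj0 hjL, hlen]
  have hg1rows : ∀ r ∈ g1, r.length = (n+b).toNat := by
    intro r hr
    rcases pvGwrite_rows hi0 hiL hj0 hjL hr with ⟨h, _⟩ | h
    · exact hrows _ h
    · rw [h, List.length_set]
      exact hrows _ hrowg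
  have hg1bnd : ∀ r ∈ g1, ∀ v ∈ r, 0 ≤ v ∧ v ≤ M := by
    intro r hr v hv
    rcases pvGwrite_rows hi0 hiL hj0 hjL hr with ⟨h, _⟩ | h
    · have := hbnd _ h _ hv
      omega
    · rw [h] at hv
      rcases List.mem_or_eq_of_mem_set hv with h2 | h2
      · have := hbnd _ hrowg _ h2
        omega
      · omega
  have hread_self : pvGread g1 i j = eB := pvGread_write_self hi0 hiL hj0 hjL
  have hread_ne : ∀ r c : Int, 0 ≤ r → 0 ≤ c → ¬ (r = i ∧ c = j) →
      pvGread g1 r c = pvGread g r c := fun r c h1 h2 h3 =>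
    pvGread_write_ne hi0 hiL hj0 hjL h1 h2 h3
  refine ⟨hS1mem, hMge.2.2, hglen, hg1rows, hg1bnd, ?_, ?_⟩
  · intro i' h1 h2 v
    rw [PySem.Dict.getD_modify]
    by_cases hii : i' = i
    · subst hii
      rw [if_pos rfl, PySem.Set.mem_add, hrow i' h1 h2 v]
      constructor
      · rintro (⟨k, hk1, hk2, hk3, rfl⟩ | rfl)
        · have hkj : k < j := by unfold pvProc at hk3; omega
          exact ⟨k, hk1, hk2, by unfold pvProc; omega,
            (hread_ne i' k (by omega) (by omega) (fun h => by omega)).symm⟩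
        · exact ⟨j, hj1, hjn, by unfold pvProc; omega, hread_self.symm⟩
      · rintro ⟨k, hk1, hk2, hk3, rfl⟩
        have hor : k < j ∨ k = j := by unfold pvProc at hk3; omega
        rcases hor with hk | rfl
        · exact Or.inl ⟨k, hk1, hk2, by unfold pvProc; omega,
            (hread_ne i' k (by omega) (by omega) (fun h => by omega))⟩
        · exact Or.inr hread_self
    · rw [if_neg hii, hrow i' h1 h2 v]
      constructor
      · rintro ⟨k, hk1, hk2, hk3, rfl⟩
        exact ⟨k, hk1, hk2, by unfold pvProc at hk3 ⊢; omega,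
          (hread_ne i' k (by omega) (by omega) (fun h => hii h.1)).symm⟩
      · rintro ⟨k, hk1, hk2, hk3, rfl⟩
        exact ⟨k, hk1, hk2, by unfold pvProc at hk3 ⊢; omega,
          hread_ne i' k (by omega) (by omega) (fun h => hii h.1)⟩
  · intro j' h1 h2 v
    rw [PySem.Dict.getD_modify]
    by_cases hjj : j' = j
    · subst hjj
      rw [if_pos rfl, PySem.Set.mem_add, hcol j' h1 h2 v]
      constructor
      · rintro (⟨k, hk1, hk2, hk3, rfl⟩ | rfl)
        · have hki : k < i := by unfold pvProc at hk3; omega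
          exact ⟨k, hk1, hk2, by unfold pvProc; omega,
            (hread_ne k j' (by omega) (by omega) (fun h => by omega)).symm⟩
        · exact ⟨i, hi1, hin, by unfold pvProc; omega, hread_self.symm⟩
      · rintro ⟨k, hk1, hk2, hk3, rfl⟩
        have hor : k < i ∨ k = i := by unfold pvProc at hk3; omega
        rcases hor with hk | rfl
        · exact Or.inl ⟨k, hk1, hk2, by unfold pvProc; omega,
            (hread_ne k j' (by omega) (by omega) (fun h => by omega))⟩
        · exact Or.inr hread_self
    · rw [if_neg hjj, hcol j' h1 h2 v]
      constructor
      · rintro ⟨k, hk1, hk2, hk3, rfl⟩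
        exact ⟨k, hk1, hk2, by unfold pvProc at hk3 ⊢; omega,
          (hread_ne k j' (by omega) (by omega) (fun h => hjj h.2)).symm⟩
      · rintro ⟨k, hk1, hk2, hk3, rfl⟩
        exact ⟨k, hk1, hk2, by unfold pvProc at hk3 ⊢; omega,
          hread_ne k j' (by omega) (by omega) (fun h => hjj h.2)⟩

-- advancing from the end of row i to the start of row i+1 re-reads the same invariant
lemma pvRel_advance {n b i : Int} {sa : pvStA} {sb : pvStB}
    (h : pvRel n b i (n+1) sa sb) : pvRel n b (i+1) 1 sa sb := by
  obtain ⟨hm, hg, h1, h2, h3, h4, h5, h6, h7⟩ := h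
  refine ⟨hm, hg, h1, h2, h3, h4, h5, ?_, ?_⟩
  · intro i' hi'1 hi'n v
    rw [h6 i' hi'1 hi'n v]
    constructor <;> rintro ⟨k, hk1, hk2, hk3, hk4⟩ <;>
      exact ⟨k, hk1, hk2, by unfold pvProc at hk3 ⊢; omega, hk4⟩
  · intro j' hj'1 hj'n v
    rw [h7 j' hj'1 hj'n v]
    constructor <;> rintro ⟨k, hk1, hk2, hk3, hk4⟩ <;>
      exact ⟨k, hk1, hk2, by unfold pvProc at hk3 ⊢; omega, hk4⟩

-- the inner loop over the remaining columns preserves the relation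
lemma pvInner {n b i : Int} (hb : 1 ≤ b) (hn : 1 ≤ n) (hi1 : 1 ≤ i) (hin : i ≤ n) :
    ∀ (fuel : Nat) (j : Int), (n + 1 - j).toNat = fuel → 1 ≤ j → j ≤ n + 1 →
    ∀ (sa : pvStA) (sb : pvStB), pvRel n b i j sa sb →
    pvRel n b i (n+1)
      ((PySem.List.pyRange j (n+1)).foldl (fun st j' => pvStepA b i j' st) sa)
      ((PySem.List.pyRange j (n+1)).foldl (fun st j' => pvStepB b i j' st) sb) := by
  intro fuel
  induction fuel with
  | zero =>
    intro j hf h1 h2 sa sb hrel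
    have hj : j = n + 1 := by omega
    subst hj
    rw [PySem.List.pyRange_one_eq_nil (le_refl _)]
    exact hrel
  | succ f ih =>
    intro j hf h1 h2 sa sb hrel
    have hjn : j ≤ n := by omega
    rw [PySem.List.pyRange_one_cons (by omega)]
    simp only [List.foldl_cons]
    obtain ⟨hm, hg, hInv⟩ := hrel
    obtain ⟨m, S, g, row, col⟩ := sa
    obtain ⟨m', g'⟩ := sb
    simp only at hm hg
    subst hm; subst hg
    exact ih (j+1) (by omega) (by omega) (by omega) _ _
      (pvStep_rel hb hn hi1 hin h1 hjn hInv)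

-- the outer loop over the remaining rows preserves the relation
lemma pvOuter {n b : Int} (hb : 1 ≤ b) (hn : 1 ≤ n) :
    ∀ (fuel : Nat) (i : Int), (n + 1 - i).toNat = fuel → 1 ≤ i → i ≤ n + 1 →
    ∀ (sa : pvStA) (sb : pvStB), pvRel n b i 1 sa sb →
    pvRel n b (n+1) 1
      ((PySem.List.pyRange i (n+1)).foldl
        (fun st i' => (PySem.List.pyRange 1 (n+1)).foldl (fun st j => pvStepA b i' j st) st) sa)
      ((PySem.List.pyRange i (n+1)).foldl
        (fun st i' => (PySem.List.pyRange 1 (n+1)).foldl (fun st j => pvStepB b i' j st) st) sb) := by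
  intro fuel
  induction fuel with
  | zero =>
    intro i hf h1 h2 sa sb hrel
    have hi : i = n + 1 := by omega
    subst hi
    rw [PySem.List.pyRange_one_eq_nil (le_refl _)]
    exact hrel
  | succ f ih =>
    intro i hf h1 h2 sa sb hrel
    have hin : i ≤ n := by omega
    have hcons : PySem.List.pyRange i (n+1) = i :: PySem.List.pyRange (i+1) (n+1) :=
      PySem.List.pyRange_one_cons (by omega)
    rw [hcons]
    simp only [List.foldl_cons]
    exact ih (i+1) (by omega) (by omega) (by omega) _ _
      (pvRel_advance (pvInner hb hn h1 hin (n + 1 - 1).toNat 1 rfl (by omega) (by omega) sa sb hrel))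

-- the initial states are related
lemma pvBase {n b : Int} (hb : 1 ≤ b) (hn : 1 ≤ n) :
    pvRel n b 1 1
      ((0 : Int), PySem.Set.ofList [(1 : Int)],
        (PySem.List.pyRange 0 (n+b)).map (fun _ => (PySem.List.pyRange 0 (n+b)).map (fun _ => (0:Int))),
        (PySem.List.pyRange 1 (n+1)).foldl (fun d i => d.insert i PySem.Set.empty) PySem.Dict.empty,
        (PySem.List.pyRange 1 (n+1)).foldl (fun d j => d.insert j PySem.Set.empty) PySem.Dict.empty)
      ((0 : Int), (PySem.List.pyRange 0 (n+b)).map (fun _ => List.replicate (n+b).toNat (0:Int))) := by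
  have hrow0 : (PySem.List.pyRange 0 (n+b)).map (fun _ => (0:Int)) = List.replicate (n+b).toNat 0 := by
    rw [List.map_const', PySem.List.length_pyRange_one]
    norm_num
  have hdict : ∀ x : Int,
      ((PySem.List.pyRange 1 (n+1)).foldl (fun d i => d.insert i PySem.Set.empty)
        PySem.Dict.empty).getD x PySem.Set.empty = PySem.Set.empty :=
    pvDictInit_getD _ _ (fun x => by simp [pysem])
  refine ⟨rfl, by simp only [hrow0], ?_, le_refl 0, ?_, ?_, ?_, ?_, ?_⟩
  · intro v
    simp only [PySem.Set.mem_ofList, List.mem_singleton]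
    omega
  · simp only [List.length_map, PySem.List.length_pyRange_one]
    omega
  · intro r hr
    simp only [List.mem_map] at hr
    obtain ⟨_, _, rfl⟩ := hr
    simp only [List.length_map, PySem.List.length_pyRange_one]
    omega
  · intro r hr v hv
    simp only [List.mem_map] at hr
    obtain ⟨_, _, rfl⟩ := hr
    simp only [List.mem_map] at hv
    obtain ⟨_, _, rfl⟩ := hv
    exact ⟨le_refl _, le_refl _⟩
  · intro i' h1 h2 v
    rw [hdict i']
    constructor
    · intro h
      exact absurd h (List.not_mem_nil)
    · rintro ⟨k, hk1, hk2, hk3, _⟩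
      unfold pvProc at hk3
      omega
  · intro j' h1 h2 v
    rw [hdict j']
    constructor
    · intro h
      exact absurd h (List.not_mem_nil)
    · rintro ⟨k, hk1, hk2, hk3, _⟩
      unfold pvProc at hk3
      omega

-- ===== VERDICT (by name: the statement is the Claim_ definition above) =====
theorem A292673_spec : Claim_equal_A292673 := by
  unfold Claim_equal_A292673
  intro n b _ hpre
  unfold Spec_A292673
  by_cases hn : n ≤ 0
  · have hnil : PySem.List.pyRange 1 (n+1) = [] := PySem.List.pyRange_one_eq_nil (by omega)
    simp [A292673, A292673_alt, hnil]
  · have hn1 : 1 ≤ n := by omega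
    have hb : 1 ≤ b := by rcases hpre with h | h <;> omega
    have hfin := pvOuter hb hn1 (n + 1 - 1).toNat 1 rfl (by omega) (by omega) _ _ (pvBase hb hn1)
    simp only [A292673, A292673_alt]
    exact hfin.1
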